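-- pv_equiv track=rewrite | github.com/nhoofficial/CSE-220-Data-Structures- | Lab-01/Task 8.py | repition
-- ===== SOURCE A (Python) =====
-- def repition(a):
--     dic = {}
--     for i in a:
--         dic[i] = 0
--     for i in dic:
--         for j in a:
--             if i == j:
--                 dic[i] += 1
--     sup = 0
--     for i in dic:
--         if dic[i] > sup:
--             sup = dic[i]
--     c = 0
--     for i in dic:
--         if dic[i] == sup:
--             c += 1
--     if c >= 2:
--         return True
--     else:
--         return False
-- ===== SOURCE B (Python) =====
-- def repition(a):
--     counts = {}
--     for x in a:
--         counts[x] = counts.get(x, 0) + 1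
--     buckets = {}
--     for v in counts.values():
--         buckets[v] = buckets.get(v, 0) + 1
--     if not buckets:
--         return False
--     m = max(buckets)
--     return buckets[m] >= 2
-- ===== Notes on version B (the rewrite author's own statement) =====
-- stated objective: faster
-- what changed: A counts each distinct element by rescanning the whole list per key (nested loops) and then makes two more passes over the dict to find the max count and tally ties; B counts in one incremental pass, builds a frequency-of-frequencies histogram, and answers by looking up the histogram at its max key.
import Mathlib
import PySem

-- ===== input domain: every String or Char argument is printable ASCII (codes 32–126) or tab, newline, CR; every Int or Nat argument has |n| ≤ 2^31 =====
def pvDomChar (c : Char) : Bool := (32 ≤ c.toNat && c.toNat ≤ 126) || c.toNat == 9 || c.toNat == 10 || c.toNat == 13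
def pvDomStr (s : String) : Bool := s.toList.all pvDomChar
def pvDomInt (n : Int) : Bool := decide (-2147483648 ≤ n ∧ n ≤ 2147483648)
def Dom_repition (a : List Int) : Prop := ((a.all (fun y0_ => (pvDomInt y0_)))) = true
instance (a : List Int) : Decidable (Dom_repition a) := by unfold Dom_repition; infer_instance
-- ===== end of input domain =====

-- B replaces A's per-key rescans of the list (nested counting loops) and its two tally passes
-- by one incremental counting pass plus a frequency-of-frequencies histogram looked up at its max key.

-- ===== PORT A =====
-- inner loop of A's counting phase: 'for j in a: if i == j: dic[i] += 1'
def repACount (a : List Int) (d : PySem.Dict Int Int) (i : Int) : PySem.Dict Int Int :=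
  a.foldl (fun d' j => if i == j then d'.modify i 0 (· + 1) else d') d

def repition (a : List Int) : Bool :=
  let dic0 := a.foldl (fun d i => d.insert i (0 : Int)) PySem.Dict.empty
  let dic := dic0.keys.foldl (fun d i => repACount a d i) dic0
  let sup := dic.keys.foldl (fun s i => if dic.getD i 0 > s then dic.getD i 0 else s) (0 : Int)
  let c := dic.keys.foldl (fun c i => if dic.getD i 0 == sup then c + 1 else c) (0 : Int)
  if c ≥ 2 then true else false

-- ===== PORT B =====
def repition_alt (a : List Int) : Bool :=
  let counts := a.foldl (fun d x => d.insert x (d.getD x 0 + 1)) (PySem.Dict.empty : PySem.Dict Int Int)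
  let buckets := counts.values.foldl (fun d v => d.insert v (d.getD v 0 + 1)) (PySem.Dict.empty : PySem.Dict Int Int)
  match PySem.List.max? buckets.keys (fun y => y) with
  | none => false
  | some m => decide (buckets.getD m 0 ≥ 2)

-- ===== PRECONDITION & SPEC =====
def Spec_repition (a : List Int) (out : Bool) : Prop := out = repition_alt a
instance (a : List Int) (out : Bool) : Decidable (Spec_repition a out) := by unfold Spec_repition; infer_instance

-- ===== CLAIM (what is proved, stated in full; the proofs are below) =====
def Claim_equal_repition : Prop := ∀ (a : List Int), Dom_repition a → Spec_repition a (repition a)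

-- ===== LEMMAS AND PROOFS =====
theorem countmap (l : List Int) (f : Int → Int) (m : Int) :
    (l.map f).count m = l.countP (fun x => f x == m) := by
  simp only [List.count, List.countP_map]; rfl

theorem countfilt (a : List Int) (i v : Int) : (a.filter (fun j => i == j)).count v = if v = i then a.count i else 0 := by
  induction a with
  | nil => simp
  | cons x t ih =>
    by_cases h : i = x
    · subst h
      simp only [List.filter_cons, beq_self_eq_true, if_true, List.count_cons, ih]
      by_cases hv : v = i <;> simp [hv, Ne.symm]
    · have hx : (i == x) = false := by simp [h]
      simp only [List.filter_cons, hx, Bool.false_eq_true, if_false, ih, List.count_cons]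
      by_cases hv : v = i
      · simp [hv, Ne.symm h]
      · simp [hv]

theorem repACount_getD (a : List Int) (d : PySem.Dict Int Int) (i v : Int) :
    (repACount a d i).getD v 0 = d.getD v 0 + (if v = i then (a.count i : Int) else 0) := by
  unfold repACount
  rw [PySem.List.foldl_congr_mem a _ (fun d' j => if i == j then d'.modify j 0 (· + 1) else d') d
        (by intro acc x hx; by_cases h : i = x <;> simp [h])]
  rw [PySem.List.foldl_if_eq_foldl_filter]
  rw [PySem.Dict.getD_foldl_modify_add_one]
  rw [countfilt]
  split <;> simp

theorem repACount_keys (a : List Int) (d : PySem.Dict Int Int) (i : Int) (h : i ∈ d.keys) :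
    (repACount a d i).keys = d.keys := by
  unfold repACount
  rw [PySem.List.foldl_congr_mem a _ (fun d' j => if i == j then d'.modify j 0 (· + 1) else d') d
        (by intro acc x hx; by_cases h : i = x <;> simp [h])]
  rw [PySem.List.foldl_if_eq_foldl_filter]
  have := PySem.Dict.keys_foldl_modify (a.filter fun j => i == j) (0 : Int) (fun _ _ v => v + 1) d
  simp only at this
  rw [this, PySem.Set.update_eq_append_filter]
  have hall : ∀ x ∈ PySem.Set.ofList (a.filter fun j => i == j), PySem.Set.contains d.keys x = true := by
    intro x hx
    have hm := (PySem.Set.mem_ofList _ _).mp hx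
    have hx' := List.of_mem_filter hm
    have hix : i = x := eq_of_beq hx'
    subst hix
    simpa [PySem.Set.contains_iff] using h
  rw [List.filter_eq_nil_iff.mpr (by
        intro x hx
        simpa using (PySem.Set.contains_iff _ _).mp (hall x hx))]
  simp

theorem outer_keys (a L : List Int) (d : PySem.Dict Int Int) (h : ∀ i ∈ L, i ∈ d.keys) :
    (L.foldl (fun d i => repACount a d i) d).keys = d.keys := by
  induction L generalizing d with
  | nil => rfl
  | cons x t ih =>
    rw [List.foldl_cons, ih _ (fun i hi => by
          rw [repACount_keys a d x (h x (by simp))]; exact h i (by simp [hi])),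
        repACount_keys a d x (h x (by simp))]

theorem outer_getD (a L : List Int) (d : PySem.Dict Int Int) (v : Int) (hnd : L.Nodup) :
    (L.foldl (fun d i => repACount a d i) d).getD v 0
      = d.getD v 0 + (if v ∈ L then (a.count v : Int) else 0) := by
  induction L generalizing d with
  | nil => simp
  | cons x t ih =>
    rw [List.foldl_cons, ih _ (List.Nodup.of_cons hnd), repACount_getD]
    have hx : x ∉ t := (List.nodup_cons.mp hnd).1
    by_cases hv : v = x
    · subst hv
      simp [hx]
    · simp [hv, List.mem_cons]

theorem ins0_getD (a : List Int) (d : PySem.Dict Int Int) (v : Int) (h : d.getD v 0 = 0) :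
    (a.foldl (fun d i => d.insert i (0 : Int)) d).getD v 0 = 0 := by
  induction a generalizing d with
  | nil => simpa using h
  | cons x t ih =>
    rw [List.foldl_cons]
    exact ih _ (by rw [PySem.Dict.getD_insert]; split <;> simp [h])

theorem foldl_max_mem' (l : List Int) (f : Int → Int) :
    ∀ init : Int, l.foldl (fun s i => max s (f i)) init = init ∨
      ∃ i ∈ l, l.foldl (fun s i => max s (f i)) init = f i := by
  induction l with
  | nil => intro init; left; rfl
  | cons x t ih =>
    intro init
    rw [List.foldl_cons]
    rcases ih (max init (f x)) with h | ⟨i, hi, he⟩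
    · rcases le_total init (f x) with hle | hle
      · right; exact ⟨x, by simp, by rw [h, max_eq_right hle]⟩
      · left; rw [h, max_eq_left hle]
    · right; exact ⟨i, by simp [hi], he⟩

def pvVals (a : List Int) : List Int :=
  (PySem.Set.ofList a).map (fun k => ((List.count k a : Nat) : Int))

def pvSup (a : List Int) : Int :=
  (PySem.Set.ofList a).foldl (fun s i => max s ((List.count i a : Int))) 0

theorem altB (a : List Int) :
    repition_alt a =
      match PySem.List.max? (PySem.Set.ofList (pvVals a)) (fun y => y) with
      | none => false
      | some m => decide (((pvVals a).count m : Int) ≥ 2) := by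
  unfold repition_alt
  simp only []
  have hvals : (PySem.Dict.counter a).values = pvVals a := by
    simp [PySem.Dict.values, PySem.Dict.items_counter, pvVals, List.map_map, Function.comp]
  rw [PySem.Dict.foldl_insert_getD_add_one_eq_counter a, hvals,
      PySem.Dict.foldl_insert_getD_add_one_eq_counter (pvVals a), PySem.Dict.keys_counter]
  cases hmax : PySem.List.max? (PySem.Set.ofList (pvVals a)) (fun y => y) with
  | none => rfl
  | some m => simp [PySem.Dict.getD_counter]

theorem altA (a : List Int) :
    repition a =
      (if (((PySem.Set.ofList a).countP (fun i => ((List.count i a : Int) == pvSup a)) : Int)) ≥ 2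
        then true else false) := by
  unfold repition
  simp only []
  have hkeys0 : (List.foldl (fun d i => d.insert i (0 : Int)) PySem.Dict.empty a).keys
      = PySem.Set.ofList a := by
    have := PySem.Dict.keys_foldl_insert a (fun _ _ => (0 : Int)) PySem.Dict.empty
    simpa [PySem.Dict.keys_empty, PySem.Set.update_nil_left] using this
  rw [hkeys0]
  set dic := List.foldl (fun d i => repACount a d i)
      (List.foldl (fun d i => d.insert i (0 : Int)) PySem.Dict.empty a) (PySem.Set.ofList a)
      with hdic
  have hkeys : dic.keys = PySem.Set.ofList a := by
    rw [hdic, outer_keys a _ _ (fun i hi => hkeys0 ▸ hi)]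
    exact hkeys0
  have hget : ∀ v ∈ PySem.Set.ofList a, dic.getD v 0 = (List.count v a : Int) := by
    intro v hv
    rw [hdic, outer_getD a _ _ v (PySem.Set.nodup_ofList a)]
    rw [ins0_getD a _ v (PySem.Dict.getD_empty v 0)]
    simp [hv]
  rw [hkeys]
  have hsup : List.foldl (fun s i => if dic.getD i 0 > s then dic.getD i 0 else s) 0
      (PySem.Set.ofList a) = pvSup a := by
    rw [PySem.List.foldl_congr_mem _ _ (fun s i => max s ((List.count i a : Int))) 0
        (fun acc x hx => by
          rw [hget x hx]
          show (if ((List.count x a : Int)) > acc then ((List.count x a : Int)) else acc)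
              = max acc ((List.count x a : Int))
          omega)]
    rfl
  rw [hsup]
  rw [PySem.List.foldl_congr_mem _ _
      (fun c i => if ((List.count i a : Int) == pvSup a) then c + 1 else c) 0
      (fun acc x hx => by rw [hget x hx])]
  rw [PySem.List.foldl_if_add_one]
  simp

theorem main_eq (a : List Int) : repition a = repition_alt a := by
  by_cases hne : a = []
  · subst hne; rfl
  · rw [altA, altB]
    obtain ⟨x, hx⟩ := List.exists_mem_of_ne_nil a hne
    obtain ⟨hb0, hbmax⟩ :=
      PySem.List.le_foldl_max_int (PySem.Set.ofList a) (fun i => (List.count i a : Int)) 0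
    have hxK : x ∈ PySem.Set.ofList a := (PySem.Set.mem_ofList a x).mpr hx
    have hsup1 : 1 ≤ pvSup a := by
      refine le_trans ?_ (hbmax x hxK)
      exact_mod_cast List.count_pos_iff.mpr hx
    have hsupmem : pvSup a ∈ pvVals a := by
      rcases foldl_max_mem' (PySem.Set.ofList a) (fun i => (List.count i a : Int)) 0 with h0 | ⟨i, hi, he⟩
      · exfalso; rw [pvSup] at hsup1; omega
      · exact List.mem_map.mpr ⟨i, hi, he.symm⟩
    cases hm : PySem.List.max? (PySem.Set.ofList (pvVals a)) (fun y => y) with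
    | none =>
      exfalso
      have := (PySem.List.max?_eq_none_iff _ _).mp hm
      have h2 := (PySem.Set.mem_ofList (pvVals a) (pvSup a)).mpr hsupmem
      rw [this] at h2
      exact absurd h2 (List.not_mem_nil)
    | some m =>
      have hmem : m ∈ pvVals a := (PySem.Set.mem_ofList _ _).mp (PySem.List.max?_mem hm)
      have hle1 : m ≤ pvSup a := by
        obtain ⟨i, hi, he⟩ := List.mem_map.mp hmem
        exact he ▸ hbmax i hi
      have hle2 : pvSup a ≤ m :=
        PySem.List.max?_isMax hm (pvSup a) ((PySem.Set.mem_ofList _ _).mpr hsupmem)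
      have hms : m = pvSup a := le_antisymm hle1 hle2
      subst hms
      simp only [pvVals]
      simp only [countmap]
      by_cases h2 :
          ((PySem.Set.ofList a).countP (fun i => ((List.count i a : Int) == pvSup a)) : Int) ≥ 2
        <;> simp [h2]

-- ===== VERDICT (by name: the statement is the Claim_ definition above) =====
theorem repition_spec : Claim_equal_repition := by
  intro a _
  unfold Spec_repition
  exact main_eq a
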